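-- pv_equiv track=rewrite | github.com/ozgurozcan00/Geant4_Master | root_analyser.py | autodetect_xyz_branches
-- ===== SOURCE A (Python) =====
-- from typing import List, Tuple, Optional, Dict
--
-- def autodetect_xyz_branches(branches: List[str]) -> Tuple[Optional[str], Optional[str], Optional[str]]:
--     lower_map = {b.lower(): b for b in branches}
--     candidates_x = ["posx", "x", "prex", "postx"]
--     candidates_y = ["posy", "y", "prey", "posty"]
--     candidates_z = ["posz", "z", "prez", "postz"]
--
--     def pick(cands):
--         for c in cands:
--             if c in lower_map:
--                 return lower_map[c]
--         return None
--
--     return pick(candidates_x), pick(candidates_y), pick(candidates_z)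
-- ===== SOURCE B (Python) =====
-- # Single forward pass with a fixed candidate->(axis, priority) table instead of
-- # building a dict of all branches and scanning candidate lists afterwards.
-- _CANDS = {"posx": (0, 0), "x": (0, 1), "prex": (0, 2), "postx": (0, 3),
--           "posy": (1, 0), "y": (1, 1), "prey": (1, 2), "posty": (1, 3),
--           "posz": (2, 0), "z": (2, 1), "prez": (2, 2), "postz": (2, 3)}
--
-- def autodetect_xyz_branches(branches):
--     best = [None, None, None]
--     for b in branches:
--         hit = _CANDS.get(b.lower())
--         if hit is None:
--             continue
--         axis, prio = hit
--         if best[axis] is None or prio <= best[axis][0]: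
--             best[axis] = (prio, b)
--     return tuple(best[a][1] if best[a] is not None else None for a in range(3))
-- ===== Notes on version B (the rewrite author's own statement) =====
-- stated objective: alternative
-- what changed: Instead of building a dict of all lowered branches and then scanning three candidate lists against it, B makes a single forward pass over branches with a fixed candidate->(axis,priority) table, keeping per axis the best (priority, name) seen so far with <= overwrite.
import Mathlib
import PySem

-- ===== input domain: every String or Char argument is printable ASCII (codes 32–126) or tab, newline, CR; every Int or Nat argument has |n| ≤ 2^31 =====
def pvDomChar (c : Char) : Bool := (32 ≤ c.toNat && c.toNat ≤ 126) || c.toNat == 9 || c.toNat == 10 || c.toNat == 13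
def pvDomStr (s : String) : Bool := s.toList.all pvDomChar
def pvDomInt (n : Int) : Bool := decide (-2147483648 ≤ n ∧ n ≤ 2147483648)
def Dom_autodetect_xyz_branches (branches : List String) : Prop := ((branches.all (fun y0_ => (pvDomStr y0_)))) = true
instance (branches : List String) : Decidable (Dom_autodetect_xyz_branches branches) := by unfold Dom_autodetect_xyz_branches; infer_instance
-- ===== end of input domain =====

set_option maxHeartbeats 1000000


-- B replaces A's "build a dict of all branches, then scan three candidate lists"
-- by a single forward pass keeping, per axis, the best (priority, name) seen so far
-- against a fixed 12-entry candidate table (objective: alternative decomposition).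

-- ===== PORT A =====
-- A's pick: first candidate present in the lowered map, returning its stored value.
def pickA (d : PySem.Dict String String) : List String → Option String
  | [] => none
  | c :: rest =>
    match d.get? c with
    | some v => some v
    | none => pickA d rest

def autodetect_xyz_branches (branches : List String) : Option String × Option String × Option String :=
  let lower_map := branches.foldl (fun d b => d.insert (PySem.Str.lower b) b) PySem.Dict.empty
  (pickA lower_map ["posx", "x", "prex", "postx"],
   pickA lower_map ["posy", "y", "prey", "posty"],
   pickA lower_map ["posz", "z", "prez", "postz"])

-- ===== PORT B =====
-- the literal dict _CANDS of Source B, as a lookup (12 keys, insertion order irrelevant: keys distinct)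
def candOf (s : String) : Option (Nat × Nat) :=
  if s = "posx" then some (0, 0) else if s = "x" then some (0, 1)
  else if s = "prex" then some (0, 2) else if s = "postx" then some (0, 3)
  else if s = "posy" then some (1, 0) else if s = "y" then some (1, 1)
  else if s = "prey" then some (1, 2) else if s = "posty" then some (1, 3)
  else if s = "posz" then some (2, 0) else if s = "z" then some (2, 1)
  else if s = "prez" then some (2, 2) else if s = "postz" then some (2, 3)
  else none

-- "if best[axis] is None or prio <= best[axis][0]: best[axis] = (prio, b)"
def updB (o : Option (Nat × String)) (prio : Nat) (b : String) : Option (Nat × String) :=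
  match o with
  | none => some (prio, b)
  | some (q, v) => if prio ≤ q then some (prio, b) else some (q, v)

def stepB (st : Option (Nat × String) × Option (Nat × String) × Option (Nat × String)) (b : String) :
    Option (Nat × String) × Option (Nat × String) × Option (Nat × String) :=
  match candOf (PySem.Str.lower b) with
  | none => st
  | some (axis, prio) =>
    if axis = 0 then (updB st.1 prio b, st.2.1, st.2.2)
    else if axis = 1 then (st.1, updB st.2.1 prio b, st.2.2)
    else (st.1, st.2.1, updB st.2.2 prio b)

def autodetect_xyz_branches_alt (branches : List String) : Option String × Option String × Option String :=
  let best := branches.foldl stepB (none, none, none)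
  (best.1.map (·.2), best.2.1.map (·.2), best.2.2.map (·.2))

-- ===== PRECONDITION & SPEC =====
def Spec_autodetect_xyz_branches (branches : List String) (out : Option String × Option String × Option String) : Prop := out = autodetect_xyz_branches_alt branches
instance (branches : List String) (out : Option String × Option String × Option String) : Decidable (Spec_autodetect_xyz_branches branches out) := by unfold Spec_autodetect_xyz_branches; infer_instance

-- ===== CLAIM (what is proved, stated in full; the proofs are below) =====
def Claim_equal_autodetect_xyz_branches : Prop := ∀ (branches : List String), Dom_autodetect_xyz_branches branches → Spec_autodetect_xyz_branches branches (autodetect_xyz_branches branches)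

-- ===== LEMMAS AND PROOFS =====

-- proof-side: pickA with the index of the winning candidate attached
def pickIdx (d : PySem.Dict String String) : Nat → List String → Option (Nat × String)
  | _, [] => none
  | i, c :: rest =>
    match d.get? c with
    | some v => some (i, v)
    | none => pickIdx d (i + 1) rest

theorem pickA_eq_map_pickIdx (d : PySem.Dict String String) (cands : List String) (i : Nat) :
    pickA d cands = (pickIdx d i cands).map (·.2) := by
  induction cands generalizing i with
  | nil => rfl
  | cons c rest ih =>
    simp only [pickA, pickIdx]
    cases d.get? c with
    | some v => rfl
    | none => exact ih (i + 1)

theorem pickIdx_ge (d : PySem.Dict String String) (cands : List String) :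
    ∀ (i p : Nat) (v : String), pickIdx d i cands = some (p, v) → i ≤ p := by
  induction cands with
  | nil => intro i p v h; simp [pickIdx] at h
  | cons c rest ih =>
    intro i p v h
    simp only [pickIdx] at h
    cases hg : d.get? c with
    | some w => rw [hg] at h; simp at h; omega
    | none => rw [hg] at h; have := ih (i + 1) p v h; omega

theorem pickIdx_insert_notmem (d : PySem.Dict String String) (b lb : String)
    (cands : List String) : ∀ (i : Nat), lb ∉ cands →
    pickIdx (d.insert lb b) i cands = pickIdx d i cands := by
  induction cands with
  | nil => intro i _; rfl
  | cons c rest ih =>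
    intro i h
    have hne : c ≠ lb := fun he => h (by simp [he])
    simp only [pickIdx, PySem.Dict.get?_insert_of_ne d b hne]
    cases d.get? c with
    | some v => rfl
    | none => exact ih (i + 1) (fun hc => h (by simp [hc]))

theorem pickIdx_insert_hit (d : PySem.Dict String String) (b lb : String)
    (cands : List String) : ∀ (i j : Nat), cands.Nodup → cands[j]? = some lb →
    pickIdx (d.insert lb b) i cands = updB (pickIdx d i cands) (i + j) b := by
  induction cands with
  | nil => intro i j _ hj; simp at hj
  | cons c rest ih =>
    intro i j hnd hj
    cases j with
    | zero =>
      simp at hj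
      subst hj
      simp only [pickIdx, PySem.Dict.get?_insert_self, updB, Nat.add_zero]
      cases hg : d.get? c with
      | some v => simp
      | none =>
        cases hp : pickIdx d (i + 1) rest with
        | none => simp
        | some pv =>
          obtain ⟨p, v⟩ := pv
          have hip := pickIdx_ge d rest (i + 1) p v hp
          have hle : i ≤ p := by omega
          simp [hle]
    | succ k =>
      simp at hj
      have hlb : lb ∈ rest := List.mem_of_getElem? hj
      have hcne : c ≠ lb := by
        intro he
        subst he
        exact (List.nodup_cons.mp hnd).1 hlb
      simp only [pickIdx, PySem.Dict.get?_insert_of_ne d b hcne]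
      cases hg : d.get? c with
      | some v =>
        have hnle : ¬ (i + (k + 1) ≤ i) := by omega
        simp [updB, hnle]
      | none =>
        rw [show i + (k + 1) = (i + 1) + k by omega]
        exact ih (i + 1) k (List.nodup_cons.mp hnd).2 hj

-- what a successful candOf lookup says about the three candidate lists
theorem candOf_none (lb : String) (h : candOf lb = none) :
    lb ∉ (["posx", "x", "prex", "postx"] : List String) ∧
    lb ∉ (["posy", "y", "prey", "posty"] : List String) ∧
    lb ∉ (["posz", "z", "prez", "postz"] : List String) := by
  unfold candOf at h
  split_ifs at h
  simp_all

theorem candOf_some (lb : String) (a p : Nat) (h : candOf lb = some (a, p)) :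
    (a = 0 ∧ (["posx", "x", "prex", "postx"] : List String)[p]? = some lb ∧
      lb ∉ (["posy", "y", "prey", "posty"] : List String) ∧
      lb ∉ (["posz", "z", "prez", "postz"] : List String)) ∨
    (a = 1 ∧ (["posy", "y", "prey", "posty"] : List String)[p]? = some lb ∧
      lb ∉ (["posx", "x", "prex", "postx"] : List String) ∧
      lb ∉ (["posz", "z", "prez", "postz"] : List String)) ∨
    (a = 2 ∧ (["posz", "z", "prez", "postz"] : List String)[p]? = some lb ∧
      lb ∉ (["posx", "x", "prex", "postx"] : List String) ∧
      lb ∉ (["posy", "y", "prey", "posty"] : List String)) := by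
  unfold candOf at h
  split_ifs at h <;>
    (simp only [Option.some.injEq, Prod.mk.injEq] at h
     obtain ⟨ha, hp⟩ := h
     subst_vars
     decide)

-- one branch step, on the pickIdx characterisation
theorem step_eq (d : PySem.Dict String String) (b : String) :
    stepB (pickIdx d 0 ["posx", "x", "prex", "postx"],
           pickIdx d 0 ["posy", "y", "prey", "posty"],
           pickIdx d 0 ["posz", "z", "prez", "postz"]) b
      = (pickIdx (d.insert (PySem.Str.lower b) b) 0 ["posx", "x", "prex", "postx"],
         pickIdx (d.insert (PySem.Str.lower b) b) 0 ["posy", "y", "prey", "posty"],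
         pickIdx (d.insert (PySem.Str.lower b) b) 0 ["posz", "z", "prez", "postz"]) := by
  generalize hl : PySem.Str.lower b = lb
  cases hc : candOf lb with
  | none =>
    obtain ⟨hx, hy, hz⟩ := candOf_none lb hc
    simp only [stepB, hl, hc]
    rw [pickIdx_insert_notmem d b lb _ 0 hx, pickIdx_insert_notmem d b lb _ 0 hy,
        pickIdx_insert_notmem d b lb _ 0 hz]
  | some ap =>
    obtain ⟨a, p⟩ := ap
    rcases candOf_some lb a p hc with ⟨ha, hj, h2, h3⟩ | ⟨ha, hj, h2, h3⟩ | ⟨ha, hj, h2, h3⟩ <;>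
      subst ha <;>
      simp only [stepB, hl, hc] <;>
      norm_num <;>
      rw [pickIdx_insert_hit d b lb _ 0 p (by decide) hj,
          pickIdx_insert_notmem d b lb _ 0 h2, pickIdx_insert_notmem d b lb _ 0 h3] <;>
      simp

theorem fold_main (bs : List String) :
    bs.foldl stepB (none, none, none)
      = (pickIdx (bs.foldl (fun d b => d.insert (PySem.Str.lower b) b) PySem.Dict.empty) 0 ["posx", "x", "prex", "postx"],
         pickIdx (bs.foldl (fun d b => d.insert (PySem.Str.lower b) b) PySem.Dict.empty) 0 ["posy", "y", "prey", "posty"],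
         pickIdx (bs.foldl (fun d b => d.insert (PySem.Str.lower b) b) PySem.Dict.empty) 0 ["posz", "z", "prez", "postz"]) := by
  induction bs using List.reverseRecOn with
  | nil => rfl
  | append_singleton bs b ih =>
    simp only [List.foldl_append, List.foldl_cons, List.foldl_nil, ih]
    exact step_eq _ b

-- ===== VERDICT (by name: the statement is the Claim_ definition above) =====
theorem autodetect_xyz_branches_spec : Claim_equal_autodetect_xyz_branches := by
  intro branches _
  unfold Spec_autodetect_xyz_branches autodetect_xyz_branches autodetect_xyz_branches_alt
  rw [fold_main]
  exact Prod.ext (pickA_eq_map_pickIdx _ _ 0) (Prod.ext (pickA_eq_map_pickIdx _ _ 0) (pickA_eq_map_pickIdx _ _ 0))
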